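-- pv_equiv track=rewrite | github.com/phongdz-cloud/Python | Lesson4/Bai8.py | findAscendingNumber
-- ===== SOURCE A (Python) =====
-- import math
--
-- def findAscendingNumber(n):
--     temp = n % 10
--     while n > 0:
--         n = math.floor(n / 10)
--         if temp <= n % 10:
--             return False
--         temp = n % 10
--     return True
-- ===== SOURCE B (Python) =====
-- def findAscendingNumber(n):
--     digits = []
--     while n > 0:
--         digits.append(n % 10)
--         n = n // 10
--     return all(a > b for a, b in zip(digits, digits[1:]))
-- ===== Notes on version B (the rewrite author's own statement) =====
-- stated objective: alternative
-- what changed: B separates digit extraction (one pass building an LSB-first list) from the ordering judgement (a single zip-adjacent-pairs check), replacing A's fused loop that threads a 'previous digit' variable and returns early.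
import Mathlib
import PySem

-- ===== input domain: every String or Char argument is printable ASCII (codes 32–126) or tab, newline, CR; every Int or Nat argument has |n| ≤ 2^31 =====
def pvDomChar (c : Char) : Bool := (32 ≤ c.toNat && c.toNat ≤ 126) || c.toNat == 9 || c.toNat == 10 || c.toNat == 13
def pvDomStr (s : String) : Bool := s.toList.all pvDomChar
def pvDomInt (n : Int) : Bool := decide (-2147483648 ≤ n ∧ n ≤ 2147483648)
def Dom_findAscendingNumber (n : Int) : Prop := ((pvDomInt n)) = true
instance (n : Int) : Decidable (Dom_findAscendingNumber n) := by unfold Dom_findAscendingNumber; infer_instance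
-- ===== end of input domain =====

-- B separates digit extraction from the ordering check; same cost, different decomposition.
-- ===== PORT A =====
-- the while loop: temp holds the previous digit; n is divided by 10 each round
-- (math.floor(n / 10) equals floor division n // 10 on the int domain, ported as PySem.Int.floordiv)
def findAscendingNumberGo (temp n : Int) : Bool :=
  if h : 0 < n then
    let n' := PySem.Int.floordiv n 10
    if temp ≤ PySem.Int.mod n' 10 then false
    else findAscendingNumberGo (PySem.Int.mod n' 10) n'
  else true
termination_by n.toNat
decreasing_by
  have h10 : (0:Int) < 10 := by omega
  have := PySem.Int.floordiv_eq_ediv_of_pos (a := n) h10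
  simp only [this]
  omega

def findAscendingNumber (n : Int) : Bool :=
  findAscendingNumberGo (PySem.Int.mod n 10) n

-- ===== PORT B =====
-- the digit-collecting loop (LSB first)
def findAscendingNumberDigits (acc : List Int) (n : Int) : List Int :=
  if h : 0 < n then
    findAscendingNumberDigits (acc ++ [PySem.Int.mod n 10]) (PySem.Int.floordiv n 10)
  else acc
termination_by n.toNat
decreasing_by
  have h10 : (0:Int) < 10 := by omega
  have := PySem.Int.floordiv_eq_ediv_of_pos (a := n) h10
  simp only [this]
  omega

def findAscendingNumber_alt (n : Int) : Bool :=
  let digits := findAscendingNumberDigits [] n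
  (digits.zip digits.tail).all (fun p => decide (p.2 < p.1))

-- ===== PRECONDITION & SPEC =====
def Spec_findAscendingNumber (n : Int) (out : Bool) : Prop := out = findAscendingNumber_alt n
instance (n : Int) (out : Bool) : Decidable (Spec_findAscendingNumber n out) := by unfold Spec_findAscendingNumber; infer_instance

-- ===== CLAIM (what is proved, stated in full; the proofs are below) =====
def Claim_equal_findAscendingNumber : Prop := ∀ (n : Int), Dom_findAscendingNumber n → Spec_findAscendingNumber n (findAscendingNumber n)

-- ===== LEMMAS AND PROOFS =====

-- the adjacent-pairs check as a recursive predicate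
def pvDesc : List Int → Bool
  | a :: b :: l => decide (b < a) && pvDesc (b :: l)
  | _ => true

theorem pvDesc_eq_zip (l : List Int) :
    (l.zip l.tail).all (fun p => decide (p.2 < p.1)) = pvDesc l := by
  match l with
  | [] => rfl
  | [a] => rfl
  | a :: b :: l =>
    have ih := pvDesc_eq_zip (b :: l)
    simp only [pvDesc, List.tail, List.zip, List.zipWith, List.all_cons] at *
    rw [ih]

theorem digits_acc (acc : List Int) (n : Int) :
    findAscendingNumberDigits acc n = acc ++ findAscendingNumberDigits [] n := by
  by_cases h : 0 < n
  · have h10 : (0:Int) < 10 := by omega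
    have hlt : (PySem.Int.floordiv n 10).toNat < n.toNat := by
      have := PySem.Int.floordiv_eq_ediv_of_pos (a := n) h10
      simp only [this]; omega
    rw [findAscendingNumberDigits]
    conv_rhs => rw [findAscendingNumberDigits]
    simp only [h, dif_pos, List.nil_append]
    rw [digits_acc (acc ++ [PySem.Int.mod n 10]), digits_acc [PySem.Int.mod n 10]]
    simp
  · rw [findAscendingNumberDigits]
    conv_rhs => rw [findAscendingNumberDigits]
    simp [h]
termination_by n.toNat
decreasing_by
  all_goals
    have h10 : (0:Int) < 10 := by omega
    have := PySem.Int.floordiv_eq_ediv_of_pos (a := n) h10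
    simp only [this]; omega

theorem digits_pos_cons (n : Int) (h : 0 < n) :
    findAscendingNumberDigits [] n
      = PySem.Int.mod n 10 :: findAscendingNumberDigits [] (PySem.Int.floordiv n 10) := by
  rw [findAscendingNumberDigits]
  simp only [h, dif_pos, List.nil_append]
  exact digits_acc _ _

theorem goA_eq_pvDesc (n : Int) :
    findAscendingNumberGo (PySem.Int.mod n 10) n = pvDesc (findAscendingNumberDigits [] n) := by
  by_cases h : 0 < n
  · have h10 : (0:Int) < 10 := by omega
    have hmod : PySem.Int.mod n 10 = n % 10 := PySem.Int.mod_eq_emod_of_pos h10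
    have hdiv : PySem.Int.floordiv n 10 = n / 10 := PySem.Int.floordiv_eq_ediv_of_pos h10
    have hmod' : PySem.Int.mod (PySem.Int.floordiv n 10) 10 = PySem.Int.floordiv n 10 % 10 :=
      PySem.Int.mod_eq_emod_of_pos h10
    rw [findAscendingNumberGo, digits_pos_cons n h]
    simp only [h, dif_pos]
    by_cases h' : 0 < PySem.Int.floordiv n 10
    · rw [digits_pos_cons _ h']
      have hlt : (PySem.Int.floordiv n 10).toNat < n.toNat := by rw [hdiv]; omega
      have ih := goA_eq_pvDesc (PySem.Int.floordiv n 10)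
      rw [digits_pos_cons _ h'] at ih
      simp only [pvDesc]
      by_cases hle : PySem.Int.mod n 10 ≤ PySem.Int.mod (PySem.Int.floordiv n 10) 10
      · rw [if_pos hle,
          decide_eq_false (by omega : ¬ (PySem.Int.mod (PySem.Int.floordiv n 10) 10 < PySem.Int.mod n 10))]
        simp
      · rw [if_neg hle, ih,
          decide_eq_true (by omega : PySem.Int.mod (PySem.Int.floordiv n 10) 10 < PySem.Int.mod n 10)]
        simp
    · -- n / 10 = 0: n is a single digit, its digit is positive, the comparison temp <= 0 fails
      have hdig : findAscendingNumberDigits [] (PySem.Int.floordiv n 10) = [] := by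
        rw [findAscendingNumberDigits, dif_neg h']
      have hmod0 : PySem.Int.mod (PySem.Int.floordiv n 10) 10 = 0 := by omega
      have hle : ¬ (PySem.Int.mod n 10 ≤ PySem.Int.mod (PySem.Int.floordiv n 10) 10) := by omega
      rw [if_neg hle, hdig]
      rw [findAscendingNumberGo, dif_neg h']
      rfl
  · rw [findAscendingNumberGo, findAscendingNumberDigits]
    simp [h, pvDesc]
termination_by n.toNat
decreasing_by
  all_goals
    have h10 : (0:Int) < 10 := by omega
    have := PySem.Int.floordiv_eq_ediv_of_pos (a := n) h10
    simp only [this]; omega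

-- ===== VERDICT (by name: the statement is the Claim_ definition above) =====
theorem findAscendingNumber_spec : Claim_equal_findAscendingNumber := by
  intro n _
  unfold Spec_findAscendingNumber findAscendingNumber findAscendingNumber_alt
  rw [pvDesc_eq_zip]
  exact goA_eq_pvDesc n
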